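-- pv_equiv track=rewrite | github.com/kokjo/shuffle | alice.py | function
-- ===== SOURCE A (Python) =====
-- N = 13
--
-- def group(n, deck):
--     while deck:
--         chunk, deck = deck[:n], deck[n:]
--         yield chunk
--
-- def swap(l, a, b): l[a], l[b] = l[b], l[a]
--
-- def function(number):
--     deck = []
--     for part in group(N, list(range(52))):
--         n = number
--         for i in range(N):
--             j = n % (N - i)
--             n = (n - j) // (N - i)
--             swap(part, i, i+j)
--         deck += part
--
--     return deck
-- ===== SOURCE B (Python) =====
-- N = 13
--
-- def function(number):
--     # Build the per-block index permutation once, then lay out all four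
--     # 13-card blocks directly: every block gets the identical permutation.
--     p = list(range(N))
--     n = number
--     for i in range(N):
--         j = n % (N - i)
--         n = (n - j) // (N - i)
--         p[i], p[i+j] = p[i+j], p[i]
--     return [N*k + p[t] for k in range(4) for t in range(N)]
-- ===== Notes on version B (the rewrite author's own statement) =====
-- stated objective: simpler
-- what changed: B runs the factorial-digit swap loop once on an identity index list to get the per-block permutation p, then emits the whole deck as a single comprehension N*k + p[t], instead of re-running the digit loop with in-place swaps on each chunk produced by a generator.
import Mathlib
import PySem

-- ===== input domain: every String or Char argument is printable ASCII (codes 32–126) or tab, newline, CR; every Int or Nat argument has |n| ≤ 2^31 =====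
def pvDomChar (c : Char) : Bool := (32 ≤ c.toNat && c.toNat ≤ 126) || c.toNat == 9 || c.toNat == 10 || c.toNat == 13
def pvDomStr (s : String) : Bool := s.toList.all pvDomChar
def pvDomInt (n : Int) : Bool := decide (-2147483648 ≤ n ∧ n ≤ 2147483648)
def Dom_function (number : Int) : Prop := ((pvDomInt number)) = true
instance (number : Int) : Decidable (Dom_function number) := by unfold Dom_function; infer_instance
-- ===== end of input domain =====

-- B computes the per-block permutation once and lays the deck out as 13*k + p[t];
-- A re-runs the digit/swap loop on each 13-chunk. Objective: simpler decomposition.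

-- ===== PORT A =====
-- swap(l, a, b): l[a], l[b] = l[b], l[a]  (indices are always in range here)
def pySwap (l : List Int) (a b : Int) : List Int :=
  PySem.List.pySetD (PySem.List.pySetD l a (PySem.List.pyGetD l b 0)) b
    (PySem.List.pyGetD l a 0)

-- one iteration of A's inner `for i in range(N)` loop body, state (n, part)
def stepA (st : Int × List Int) (i : Int) : Int × List Int :=
  let j := PySem.Int.mod st.1 (13 - i)
  let n := PySem.Int.floordiv (st.1 - j) (13 - i)
  (n, pySwap st.2 i (i + j))

-- group(13, deck): yield 13-slices until the deck is empty (exact: Python slices)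
def pyGroup (deck : List Int) : List (List Int) :=
  if h : deck = [] then []
  else PySem.List.slice deck none (some 13) :: pyGroup (PySem.List.slice deck (some 13) none)
termination_by deck.length
decreasing_by
  rw [PySem.List.slice_from _ (by norm_num : (0:Int) ≤ 13)]
  have := List.length_pos_of_ne_nil h
  simp only [List.length_drop]
  omega

def function (number : Int) : List Int :=
  (pyGroup (PySem.List.pyRange 0 52 1)).foldl
    (fun deck part =>
      deck ++ ((PySem.List.pyRange 0 13 1).foldl stepA (number, part)).2)
    []

-- ===== PORT B =====
def function_alt (number : Int) : List Int :=
  let st := (PySem.List.pyRange 0 13 1).foldl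
    (fun (st : Int × List Int) i =>
      let j := PySem.Int.mod st.1 (13 - i)
      (PySem.Int.floordiv (st.1 - j) (13 - i),
        PySem.List.pySetD
          (PySem.List.pySetD st.2 i (PySem.List.pyGetD st.2 (i + j) 0))
          (i + j) (PySem.List.pyGetD st.2 i 0)))
    (number, PySem.List.pyRange 0 13 1)
  (PySem.List.pyRange 0 4 1).flatMap (fun k =>
    (PySem.List.pyRange 0 13 1).map (fun t => 13 * k + PySem.List.pyGetD st.2 t 0))

-- ===== PRECONDITION & SPEC =====
def Spec_function (number : Int) (out : List Int) : Prop := out = function_alt number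
instance (number : Int) (out : List Int) : Decidable (Spec_function number out) := by unfold Spec_function; infer_instance

-- ===== CLAIM (what is proved, stated in full; the proofs are below) =====
def Claim_equal_function : Prop := ∀ (number : Int), Dom_function number → Spec_function number (function number)

-- ===== LEMMAS AND PROOFS =====

theorem fold_length (is : List Int) (n : Int) (l : List Int) :
    ((is.foldl stepA (n, l)).2).length = l.length := by
  induction is generalizing n l with
  | nil => rfl
  | cons i is ih =>
    simp only [List.foldl_cons]
    rw [ih]
    simp [stepA, pySwap, PySem.List.length_pySetD]

theorem pySwap_map (l : List Int) (a b : Int) (f : Int → Int)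
    (ha0 : 0 ≤ a) (ha : a < (l.length : Int)) (hb0 : 0 ≤ b) (hb : b < (l.length : Int)) :
    pySwap (l.map f) a b = (pySwap l a b).map f := by
  unfold pySwap
  rw [PySem.List.pyGetD_eq_getElem (l.map f) 0 hb0 (by simpa using hb),
      PySem.List.pyGetD_eq_getElem (l.map f) 0 ha0 (by simpa using ha),
      PySem.List.pyGetD_eq_getElem l 0 hb0 hb,
      PySem.List.pyGetD_eq_getElem l 0 ha0 ha,
      PySem.List.pySetD_of_nonneg _ _ ha0, PySem.List.pySetD_of_nonneg _ _ ha0,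
      PySem.List.pySetD_of_nonneg _ _ hb0, PySem.List.pySetD_of_nonneg _ _ hb0]
  simp [List.map_set]

theorem fold_map (is : List Int) (hmem : ∀ i ∈ is, 0 ≤ i ∧ i < 13)
    (n : Int) (l : List Int) (hl : l.length = 13) (f : Int → Int) :
    is.foldl stepA (n, l.map f)
      = ((is.foldl stepA (n, l)).1, ((is.foldl stepA (n, l)).2).map f) := by
  induction is generalizing n l with
  | nil => rfl
  | cons i is ih =>
    obtain ⟨hi0, hi13⟩ := hmem i (List.mem_cons_self ..)
    have hpos : (0:Int) < 13 - i := by omega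
    have hj0 := PySem.Int.mod_nonneg n hpos
    have hjlt := PySem.Int.mod_lt n hpos
    have hlen13 : (l.length : Int) = 13 := by exact_mod_cast hl
    simp only [List.foldl_cons]
    have hstep : stepA (n, l.map f) i = ((stepA (n, l) i).1, ((stepA (n, l) i).2).map f) := by
      simp only [stepA]
      rw [pySwap_map l i (i + PySem.Int.mod n (13 - i)) f hi0 (by omega) (by omega) (by omega)]
    rw [hstep]
    have hl' : ((stepA (n, l) i).2).length = 13 := by
      simp [stepA, pySwap, PySem.List.length_pySetD, hl]
    exact ih (fun x hx => hmem x (List.mem_cons_of_mem _ hx)) _ _ hl'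

-- the four 13-chunks of range(52)
theorem pyGroup_eval :
    pyGroup (PySem.List.pyRange 0 52 1)
      = [(PySem.List.pyRange 0 13 1).map (fun x => 13 * 0 + x),
         (PySem.List.pyRange 0 13 1).map (fun x => 13 * 1 + x),
         (PySem.List.pyRange 0 13 1).map (fun x => 13 * 2 + x),
         (PySem.List.pyRange 0 13 1).map (fun x => 13 * 3 + x)] := by
  rw [pyGroup.eq_def, dif_neg (by decide)]
  rw [pyGroup.eq_def, dif_neg (by decide)]
  rw [pyGroup.eq_def, dif_neg (by decide)]
  rw [pyGroup.eq_def, dif_neg (by decide)]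
  rw [pyGroup.eq_def, dif_pos (by decide)]
  decide

theorem map_index (P : List Int) (hP : PySem.List.len P = 13) (k : Int) :
    (PySem.List.pyRange 0 13 1).map (fun t => 13 * k + PySem.List.pyGetD P t 0)
      = P.map (fun x => 13 * k + x) := by
  have h := PySem.List.map_pyGetD_pyRange_zero P (0:Int)
  rw [hP] at h
  conv_rhs => rw [← h, List.map_map]
  rfl

-- ===== VERDICT (by name: the statement is the Claim_ definition above) =====
theorem function_spec : Claim_equal_function := by
  intro number _
  unfold Spec_function function function_alt
  have hBA : (fun (st : Int × List Int) i =>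
      let j := PySem.Int.mod st.1 (13 - i)
      (PySem.Int.floordiv (st.1 - j) (13 - i),
        PySem.List.pySetD
          (PySem.List.pySetD st.2 i (PySem.List.pyGetD st.2 (i + j) 0))
          (i + j) (PySem.List.pyGetD st.2 i 0))) = stepA := by
    funext st i
    rfl
  rw [hBA]
  have hmem : ∀ i ∈ PySem.List.pyRange 0 13 1, 0 ≤ i ∧ i < 13 := by
    intro i hi
    rw [PySem.List.mem_pyRange_one] at hi
    omega
  have hbase : (PySem.List.pyRange 0 13 1).length = 13 := by decide
  set P := ((PySem.List.pyRange 0 13 1).foldl stepA (number, PySem.List.pyRange 0 13 1)).2 with hPdef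
  have hPlen : PySem.List.len P = 13 := by
    have : P.length = 13 := by rw [hPdef, fold_length]; exact hbase
    simp [PySem.List.len_eq, this]
  have hblock : ∀ k : Int,
      ((PySem.List.pyRange 0 13 1).foldl stepA
        (number, (PySem.List.pyRange 0 13 1).map (fun x => 13 * k + x))).2
        = P.map (fun x => 13 * k + x) := by
    intro k
    rw [fold_map _ hmem number _ hbase]
  have h4 : PySem.List.pyRange 0 4 1 = [0, 1, 2, 3] := by decide
  rw [pyGroup_eval, h4]
  simp only [List.foldl_cons, List.foldl_nil, List.nil_append,
    List.flatMap_cons, List.flatMap_nil, List.append_nil]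
  rw [hblock 0, hblock 1, hblock 2, hblock 3,
      map_index P hPlen 0, map_index P hPlen 1, map_index P hPlen 2, map_index P hPlen 3]
  simp [List.append_assoc]
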